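-- pv_equiv track=rewrite | github.com/Vum-Si/OMP | omp_server/service_conf/utils.py | head_filed
-- ===== SOURCE A (Python) =====
-- def head_filed(db_field):
--     """
--     db_field ["a","b.x.c","c"]
--     return:
--     [{"name":"a",key:"a",type:"x"},
--     {"name":"b.x",key:"b.x",type:"x"},
--     {"name":"b.c",key:"b.c",type:"x"}
--     {"name":"c",key:"c",type:"x"}
--     ],
--     {1:["x","c"]}(index)
--     """
--     head_name = {
--         "install_detail_args": ["安装参数", "obj"],
--         "app_install_args": ["安装参数", "obj"],
--         "app_port": ["服务端口", "obj"],
--         "app_dependence": ["服务依赖", "pkg_de"],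
--         "app_name": ["服务包名称", "str"],
--         "app_version": ["服务包版本", "str"],
--         "service_port": ["服务端口", "obj"],
--         "service_controllers": ["脚本控制", "obj"],
--         "service_role": ["服务角色", "str"],
--         "service_status": ["数据库服务状态", "str"],
--         "vip": ["虚ip", "str"],
--         "deploy_mode": ["部署模式", "str"],
--         "service_instance_name": ["实例名称", "str"],
--         "ip": ["地址", "str"],
--         "service_dependence": ["服务依赖", "de"],
--         "id": ["id", "str"]
--     }
--     new_head = []
--     new_index = []
--     for index, field in enumerate(db_field):
--         fields = field.split(".")
--         head_info = head_name[fields[0]]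
--         if head_info[1] == "obj" and len(fields) >= 2:
--             # new_index[index] = fields[1:]
--             for child in fields[1:]:
--                 new_head.append({
--                     "name": f"{head_info[0]}-{child}",
--                     "key": f"{fields[0]}.{child}",
--                     "type": "str"
--                 })
--                 new_index.append(f"{fields[0]}.{child}")
--         else:
--             new_head.append({
--                 "name": head_info[0],
--                 "key": field,
--                 "type": head_info[1]
--             })
--             new_index.append(field)
--     return new_head, new_index
-- ===== SOURCE B (Python) =====
-- def head_filed(db_field):
--     head_name = {
--         "install_detail_args": ["安装参数", "obj"],
--         "app_install_args": ["安装参数", "obj"],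
--         "app_port": ["服务端口", "obj"],
--         "app_dependence": ["服务依赖", "pkg_de"],
--         "app_name": ["服务包名称", "str"],
--         "app_version": ["服务包版本", "str"],
--         "service_port": ["服务端口", "obj"],
--         "service_controllers": ["脚本控制", "obj"],
--         "service_role": ["服务角色", "str"],
--         "service_status": ["数据库服务状态", "str"],
--         "vip": ["虚ip", "str"],
--         "deploy_mode": ["部署模式", "str"],
--         "service_instance_name": ["实例名称", "str"],
--         "ip": ["地址", "str"],
--         "service_dependence": ["服务依赖", "de"],
--         "id": ["id", "str"]
--     }
--     # pass 1: compute the flat key list (new_index) alone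
--     new_index = []
--     for field in db_field:
--         parts = field.split(".")
--         if head_name[parts[0]][1] == "obj" and len(parts) >= 2:
--             for c in parts[1:]:
--                 new_index.append(parts[0] + "." + c)
--         else:
--             new_index.append(field)
--     # pass 2: rebuild each header dict by parsing its key (first-dot split), no per-field state
--     new_head = []
--     for key in new_index:
--         i = key.find(".")
--         top = key[:i] if i >= 0 else key
--         name, typ = head_name[top]
--         if i >= 0 and typ == "obj":
--             new_head.append({"name": name + "-" + key[i + 1:], "key": key, "type": "str"})
--         else:
--             new_head.append({"name": name, "key": key, "type": typ})
--     return new_head, new_index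
-- ===== Notes on version B (the rewrite author's own statement) =====
-- stated objective: alternative
-- what changed: B replaces A's single interleaved loop over fields (appending to two parallel accumulators) by two staged passes: first it computes only the flat key list new_index, then it rebuilds every header dict by re-parsing its key string with find/slice at the first dot and a fresh table lookup, so new_head is a pure function of new_index.
import Mathlib
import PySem

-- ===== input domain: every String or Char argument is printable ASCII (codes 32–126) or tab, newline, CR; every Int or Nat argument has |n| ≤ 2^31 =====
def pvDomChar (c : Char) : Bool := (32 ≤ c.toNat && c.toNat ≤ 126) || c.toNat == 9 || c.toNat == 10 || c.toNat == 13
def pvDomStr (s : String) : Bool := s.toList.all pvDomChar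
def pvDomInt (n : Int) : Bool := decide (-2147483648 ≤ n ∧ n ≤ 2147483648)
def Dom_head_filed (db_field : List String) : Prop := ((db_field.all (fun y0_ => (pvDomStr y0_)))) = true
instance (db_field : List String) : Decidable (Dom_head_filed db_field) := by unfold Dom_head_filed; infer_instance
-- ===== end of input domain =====

-- B stages the work differently: pass 1 builds only the key list new_index; pass 2 rebuilds each
-- header dict by re-parsing its key (find/slice at the first dot + a fresh table lookup).

-- shared data table: the head_name dict literal (key ↦ (display name, type))
def headName : List (String × (String × String)) :=
  [("install_detail_args", ("安装参数", "obj")),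
   ("app_install_args", ("安装参数", "obj")),
   ("app_port", ("服务端口", "obj")),
   ("app_dependence", ("服务依赖", "pkg_de")),
   ("app_name", ("服务包名称", "str")),
   ("app_version", ("服务包版本", "str")),
   ("service_port", ("服务端口", "obj")),
   ("service_controllers", ("脚本控制", "obj")),
   ("service_role", ("服务角色", "str")),
   ("service_status", ("数据库服务状态", "str")),
   ("vip", ("虚ip", "str")),
   ("deploy_mode", ("部署模式", "str")),
   ("service_instance_name", ("实例名称", "str")),
   ("ip", ("地址", "str")),
   ("service_dependence", ("服务依赖", "de")),
   ("id", ("id", "str"))]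

-- a dict literal {"name": n, "key": k, "type": t}
def mkEntry (n k t : String) : List (String × String) :=
  [("name", n), ("key", k), ("type", t)]

-- ===== PORT A =====
-- A's loop body: one field, the two parallel accumulators (new_head, new_index);
-- field.split(".") with nonempty separator always returns some, hence .getD [];
-- a key missing from head_name raises KeyError in Python (excluded by Pre_): the port skips.
def stepA (acc : (List (List (String × String))) × List String) (field : String) :
    (List (List (String × String))) × List String :=
  let fields := (PySem.Str.split? field ".").getD []
  match fields with
  | [] => acc
  | f0 :: rest =>
    match headName.lookup f0 with
    | none => acc
    | some head_info =>
      if head_info.2 == "obj" && decide (2 ≤ fields.length) then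
        rest.foldl
          (fun acc2 child =>
            (acc2.1 ++ [mkEntry (head_info.1 ++ "-" ++ child) (f0 ++ "." ++ child) "str"],
             acc2.2 ++ [f0 ++ "." ++ child]))
          acc
      else
        (acc.1 ++ [mkEntry head_info.1 field head_info.2], acc.2 ++ [field])

def head_filed (db_field : List String) : (List (List (String × String))) × List String :=
  db_field.foldl stepA ([], [])

-- ===== PORT B =====
-- B pass-1 loop body: append this field's keys to new_index (KeyError excluded by Pre_: skip)
def keysStep (acc : List String) (field : String) : List String :=
  let parts := (PySem.Str.split? field ".").getD []
  match parts with
  | [] => acc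
  | f0 :: rest =>
    match headName.lookup f0 with
    | none => acc
    | some nt =>
      if nt.2 == "obj" && decide (2 ≤ parts.length) then
        rest.foldl (fun a c => a ++ [f0 ++ "." ++ c]) acc
      else acc ++ [field]

-- B pass-2 body: rebuild the header dict from the key alone (i = key.find("."), slices;
-- a lookup miss would be KeyError in Python — unreachable under Pre_, the port yields [])
def dictFromKey (key : String) : List (String × String) :=
  let i := PySem.Str.find key "."
  let top := if 0 ≤ i then PySem.Str.slice key none (some i) else key
  match headName.lookup top with
  | none => []
  | some nt =>
    if decide (0 ≤ i) && nt.2 == "obj" then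
      mkEntry (nt.1 ++ "-" ++ PySem.Str.slice key (some (i + 1)) none) key "str"
    else mkEntry nt.1 key nt.2

def head_filed_alt (db_field : List String) : (List (List (String × String))) × List String :=
  let new_index := db_field.foldl keysStep []
  (new_index.foldl (fun a k => a ++ [dictFromKey k]) [], new_index)

-- ===== PRECONDITION & SPEC =====
-- Pre_ excludes exactly the inputs where A raises KeyError: a field whose first '.'-segment
-- is not a key of head_name.
def Pre_head_filed (db_field : List String) : Prop :=
  ∀ f ∈ db_field, (headName.lookup (((PySem.Str.split? f ".").getD []).headD "")).isSome = true
instance (db_field : List String) : Decidable (Pre_head_filed db_field) := by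
  unfold Pre_head_filed; infer_instance

def pvWitness_head_filed : List String := ["app_name", "app_port.http.ssh", "ip"]

def Spec_head_filed (db_field : List String) (out : (List (List (String × String))) × List String) : Prop := out = head_filed_alt db_field
instance (db_field : List String) (out : (List (List (String × String))) × List String) : Decidable (Spec_head_filed db_field out) := by unfold Spec_head_filed; infer_instance

-- ===== CLAIM (what is proved, stated in full; the proofs are below) =====
def Claim_equal_head_filed : Prop := ∀ (db_field : List String), Dom_head_filed db_field → Pre_head_filed db_field → Spec_head_filed db_field (head_filed db_field)

-- ===== LEMMAS AND PROOFS =====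

-- simple recursive model of str.split(".") (single-character separator)
def splitDot : List Char → List (List Char)
  | [] => [[]]
  | c :: r => if c = '.' then [] :: splitDot r else (splitDot r).modifyHead (c :: ·)

theorem modifyHead_fun_id {α : Type} (l : List α) : l.modifyHead (fun x => x) = l := by
  cases l <;> rfl

theorem splitDot_ne_nil (l : List Char) : splitDot l ≠ [] := by
  induction l with
  | nil => simp [splitDot]
  | cons c r ih =>
    simp only [splitDot]
    split_ifs
    · simp
    · intro h
      exact ih (by simpa using congrArg List.length h)

theorem go_model (fuel : Nat) (l cur : List Char) (acc : List (List Char))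
    (hf : l.length ≤ fuel) :
    PySem.Chars.splitOn.go ['.'] fuel l cur acc
      = acc.reverse ++ (splitDot l).modifyHead (cur.reverse ++ ·) := by
  induction fuel generalizing l cur acc with
  | zero =>
    interval_cases hl : l.length
    · rw [List.length_eq_zero_iff] at hl
      subst hl
      simp [PySem.Chars.splitOn.go, splitDot]
  | succ n ih =>
    cases l with
    | nil => simp [PySem.Chars.splitOn.go, splitDot]
    | cons c r =>
      simp only [PySem.Chars.splitOn.go]
      by_cases hc : c = '.'
      · subst hc
        rw [if_pos (by simp [List.isPrefixOf])]
        rw [ih _ _ _ (by simpa using Nat.le_of_succ_le_succ (by simpa using hf))]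
        simp [splitDot, modifyHead_fun_id]
      · rw [if_neg (by simp [List.isPrefixOf]; exact fun h => hc h.symm)]
        rw [ih _ _ _ (by simpa using Nat.le_of_succ_le_succ (by simpa using hf))]
        obtain ⟨g0, grest, hg⟩ := List.exists_cons_of_ne_nil (splitDot_ne_nil r)
        simp [splitDot, hc, hg]

theorem splitOn_model (cs : List Char) :
    PySem.Chars.splitOn cs ['.'] = splitDot cs := by
  have := go_model (cs.length + 1) cs [] [] (by omega)
  simpa [PySem.Chars.splitOn, modifyHead_fun_id] using this

-- the split? a field undergoes, at char level
theorem split?_dot (field : String) :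
    ((PySem.Str.split? field ".").getD []).map String.toList = splitDot field.toList := by
  have h := PySem.Str.split?_map field "."
  have : PySem.Chars.split? field.toList ".".toList = some (splitDot field.toList) := by
    simp [PySem.Chars.split?, splitOn_model]
  rw [this] at h
  cases hs : PySem.Str.split? field "." with
  | none => rw [hs] at h; simp at h
  | some parts => rw [hs] at h; simpa using h

-- characterisation of the head piece of splitDot
theorem splitDot_head (l f0 : List Char) (rest : List (List Char))
    (h : splitDot l = f0 :: rest) :
    '.' ∉ f0 ∧ (rest = [] → l = f0) ∧ (rest ≠ [] → ∃ t, l = f0 ++ '.' :: t) := by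
  induction l generalizing f0 rest with
  | nil =>
    simp only [splitDot] at h
    injection h with h1 h2
    subst h1; subst h2
    simp
  | cons c r ih =>
    simp only [splitDot] at h
    by_cases hc : c = '.'
    · rw [if_pos hc] at h
      injection h with h1 h2
      subst h1; subst h2
      refine ⟨by simp, ?_, ?_⟩
      · intro hrest; exact absurd hrest (splitDot_ne_nil r)
      · intro _; exact ⟨r, by simp [hc]⟩
    · rw [if_neg hc] at h
      obtain ⟨g0, grest, hg⟩ := List.exists_cons_of_ne_nil (splitDot_ne_nil r)
      rw [hg] at h
      simp only [List.modifyHead] at h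
      injection h with h1 h2
      subst h1; subst h2
      obtain ⟨hA, hB, hC⟩ := ih g0 grest hg
      refine ⟨?_, ?_, ?_⟩
      case _ =>
        intro hmem
        rcases List.mem_cons.mp hmem with h' | h'
        · exact hc h'.symm
        · exact hA h'
      · intro hrest; rw [hB hrest]
      · intro hrest
        obtain ⟨t, ht⟩ := hC hrest
        exact ⟨t, by simp [ht]⟩

-- find of '.' in a dot-free string / before the first dot
theorem find_dot_of_not_mem (cs : List Char) (h : '.' ∉ cs) :
    PySem.Chars.find cs ['.'] = -1 := by
  rw [PySem.Chars.find_eq_neg_one_iff]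
  intro hinf
  exact h (hinf.subset (by simp))

theorem find_dot_append (top t : List Char) (h : '.' ∉ top) :
    PySem.Chars.find (top ++ '.' :: t) ['.'] = (top.length : Int) := by
  have h0 : 0 ≤ PySem.Chars.find (top ++ '.' :: t) ['.'] := by
    rw [PySem.Chars.find_nonneg_iff]
    exact ⟨top, t, by simp⟩
  obtain ⟨hpre, hmin⟩ := PySem.Chars.find_spec (s := top ++ '.' :: t) (sub := ['.']) h0
  set n := (PySem.Chars.find (top ++ '.' :: t) ['.']).toNat with hn
  have hne : n = top.length := by
    rcases Nat.lt_trichotomy n top.length with hlt | heq | hgt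
    · exfalso
      have hdrop : (top ++ '.' :: t).drop n = top.drop n ++ '.' :: t :=
        List.drop_append_of_le_length (Nat.le_of_lt hlt)
      obtain ⟨u, hu⟩ := hpre
      rw [hdrop] at hu
      have hne' : top.drop n ≠ [] := by
        intro h'
        have := congrArg List.length h'
        simp at this
        omega
      obtain ⟨d0, dr, hd⟩ := List.exists_cons_of_ne_nil hne'
      rw [hd] at hu
      simp at hu
      apply h
      have : d0 ∈ top.drop n := by rw [hd]; simp
      rw [← hu.1] at this
      exact List.mem_of_mem_drop this
    · exact heq
    · exfalso
      apply hmin top.length hgt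
      rw [List.drop_left]
      exact ⟨t, rfl⟩
  have := Int.toNat_of_nonneg h0
  omega

-- A's inner per-children loop appends the mapped entries and keys
theorem inner_loop (e : String → List (String × String)) (g : String → String)
    (rest : List String) (h : List (List (String × String))) (i : List String) :
    rest.foldl (fun acc2 c => (acc2.1 ++ [e c], acc2.2 ++ [g c])) (h, i)
      = (h ++ rest.map e, i ++ rest.map g) := by
  induction rest generalizing h i with
  | nil => simp
  | cons c cs ih => simp [List.foldl_cons, ih]

-- B's inner append loops are maps
theorem foldl_app {α β : Type} (l : List α) (g : α → β) (acc : List β) :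
    l.foldl (fun a x => a ++ [g x]) acc = acc ++ l.map g := by
  induction l generalizing acc with
  | nil => simp
  | cons x xs ih => simp [ih]

-- dictFromKey on an expansion key f0 ++ "." ++ c rebuilds A's expansion entry
theorem dictFromKey_expansion (f0 c : String) (nt : String × String)
    (hnd : '.' ∉ f0.toList) (hl : headName.lookup f0 = some nt) (hobj : nt.2 = "obj") :
    dictFromKey (f0 ++ "." ++ c) = mkEntry (nt.1 ++ "-" ++ c) (f0 ++ "." ++ c) "str" := by
  have hkey : (f0 ++ "." ++ c).toList = f0.toList ++ '.' :: c.toList := by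
    simp [String.toList_append]
  have hfindc : PySem.Chars.find (f0.toList ++ '.' :: c.toList) ['.'] = (f0.toList.length : Int) :=
    find_dot_append f0.toList c.toList hnd
  have htop : PySem.Str.slice (f0 ++ "." ++ c) none (some (f0.length : Int)) = f0 := by
    apply String.toList_inj.mp
    rw [PySem.Str.toList_slice, PySem.Chars.slice_eq_listSlice, hkey,
      PySem.List.slice_to _ (by positivity)]
    rw [show ((f0.length : Int)).toNat = f0.toList.length by simp]
    exact List.take_left
  have hchild : PySem.Str.slice (f0 ++ "." ++ c) (some ((f0.length : Int) + 1)) none = c := by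
    apply String.toList_inj.mp
    rw [PySem.Str.toList_slice, PySem.Chars.slice_eq_listSlice, hkey,
      PySem.List.slice_from _ (by positivity)]
    rw [show ((f0.length : Int) + 1).toNat = (f0.toList ++ ['.']).length by simp]
    rw [show f0.toList ++ '.' :: c.toList = (f0.toList ++ ['.']) ++ c.toList by simp]
    exact List.drop_left
  simp [dictFromKey, hkey, hfindc, htop, hl, hchild, hobj]

-- dictFromKey on a plain key (A's else branch) rebuilds A's plain entry
theorem dictFromKey_plain (field f0 : String) (rest : List String) (nt : String × String)
    (hsplit : ((PySem.Str.split? field ".").getD []).map String.toList = f0.toList :: rest.map String.toList)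
    (hnd : '.' ∉ f0.toList) (hl : headName.lookup f0 = some nt)
    (hno : ¬(nt.2 = "obj" ∧ rest ≠ [])) :
    dictFromKey field = mkEntry nt.1 field nt.2 := by
  have hchar := split?_dot field
  rw [hsplit] at hchar
  cases hrest : rest with
  | nil =>
    rw [hrest] at hchar
    obtain ⟨_, hB, _⟩ := splitDot_head field.toList f0.toList [] hchar.symm
    have hfeq : field.toList = f0.toList := hB rfl
    have hfindc : PySem.Chars.find field.toList ['.'] = -1 :=
      find_dot_of_not_mem field.toList (hfeq ▸ hnd)
    have hfs : field = f0 := String.toList_inj.mp hfeq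
    subst hfs
    simp [dictFromKey, hfindc, hl]
  | cons r0 rs =>
    rw [hrest] at hchar
    obtain ⟨_, _, hC⟩ := splitDot_head field.toList f0.toList _ hchar.symm
    obtain ⟨t, ht⟩ := hC (by simp)
    have hfindc : PySem.Chars.find field.toList ['.'] = (f0.toList.length : Int) := by
      rw [ht]; exact find_dot_append f0.toList t hnd
    have htop : PySem.Str.slice field none (some (f0.length : Int)) = f0 := by
      apply String.toList_inj.mp
      rw [PySem.Str.toList_slice, PySem.Chars.slice_eq_listSlice, ht,
        PySem.List.slice_to _ (by positivity)]
      rw [show ((f0.length : Int)).toNat = f0.toList.length by simp]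
      exact List.take_left
    have hnobj : nt.2 ≠ "obj" := fun h => hno ⟨h, by simp [hrest]⟩
    simp [dictFromKey, hfindc, htop, hl, hnobj]

-- one step of A's loop appends (keysStep [] field) and its dictFromKey image
theorem stepA_eq (acc : (List (List (String × String))) × List String) (field : String)
    (hf : (headName.lookup (((PySem.Str.split? field ".").getD []).headD "")).isSome = true) :
    stepA acc field
      = (acc.1 ++ (keysStep [] field).map dictFromKey, acc.2 ++ keysStep [] field) := by
  obtain ⟨a1, a2⟩ := acc
  simp only [stepA, keysStep]
  cases hs : (PySem.Str.split? field ".").getD [] with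
  | nil =>
    exfalso
    have := split?_dot field
    rw [hs] at this
    exact splitDot_ne_nil field.toList this.symm
  | cons f0 rest =>
    have hchar := split?_dot field
    rw [hs] at hchar
    obtain ⟨hnd, _, _⟩ := splitDot_head field.toList f0.toList (rest.map String.toList)
      (by simpa using hchar.symm)
    rw [hs] at hf
    simp only [List.headD] at hf
    cases hl : headName.lookup f0 with
    | none => rw [hl] at hf; simp at hf
    | some nt =>
      simp only [hl]
      split_ifs with hc
      · -- expansion branch
        rw [foldl_app, inner_loop]
        have hobj : nt.2 = "obj" := by
          rcases Bool.and_eq_true .. |>.mp hc with ⟨h1, _⟩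
          exact (beq_iff_eq).mp h1
        simp only [List.nil_append, List.map_map]
        refine Prod.ext ?_ rfl
        simp only []
        congr 1
        apply List.map_congr_left
        intro c hcmem
        exact (dictFromKey_expansion f0 c nt hnd hl hobj).symm
      · -- plain branch
        have hno : ¬(nt.2 = "obj" ∧ rest ≠ []) := by
          rintro ⟨h1, h2⟩
          apply hc
          simp only [h1, beq_self_eq_true, Bool.true_and, decide_eq_true_eq]
          have : rest.length ≥ 1 := List.length_pos_of_ne_nil h2
          simp only [List.length_cons]
          omega
        simp [dictFromKey_plain field f0 rest nt (by simp [hs]) hnd hl hno]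

-- keysStep always appends to its accumulator
theorem keysStep_append (acc : List String) (field : String) :
    keysStep acc field = acc ++ keysStep [] field := by
  cases hs : (PySem.Str.split? field ".").getD [] with
  | nil => simp [keysStep, hs]
  | cons f0 rest =>
    cases hl : headName.lookup f0 with
    | none => simp [keysStep, hs, hl]
    | some nt =>
      simp only [keysStep, hs, hl]
      split_ifs with h
      · rw [foldl_app, foldl_app]; simp
      · simp

-- A's whole loop, given Pre_ on every element
theorem loopA_eq (l : List String)
    (hp : ∀ f ∈ l, (headName.lookup (((PySem.Str.split? f ".").getD []).headD "")).isSome = true)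
    (h : List (List (String × String))) (i : List String) :
    l.foldl stepA (h, i)
      = (h ++ (l.flatMap (keysStep [])).map dictFromKey, i ++ l.flatMap (keysStep [])) := by
  induction l generalizing h i with
  | nil => simp
  | cons f fs ih =>
    rw [List.foldl_cons, stepA_eq (h, i) f (hp f (by simp))]
    rw [ih (fun g hg => hp g (by simp [hg]))]
    simp

-- B's pass 1 is the same flatMap
theorem loopB_eq (l : List String) (acc : List String) :
    l.foldl keysStep acc = acc ++ l.flatMap (keysStep []) := by
  induction l generalizing acc with
  | nil => simp
  | cons f fs ih =>
    rw [List.foldl_cons, keysStep_append, ih]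
    simp

theorem map_singleton_flatten {α β : Type} (f : α → β) (l : List α) :
    (l.map (fun x => [f x])).flatten = l.map f := by
  induction l with
  | nil => rfl
  | cons x xs ih => simp [ih]

-- ===== VERDICT (by name: the statement is the Claim_ definition above) =====
theorem head_filed_spec : Claim_equal_head_filed := by
  intro db_field _ hpre
  unfold Spec_head_filed head_filed head_filed_alt
  rw [loopA_eq db_field hpre [] []]
  simp only [loopB_eq db_field []]
  simp [map_singleton_flatten]
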